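-- pv_equiv track=rewrite | github.com/grio43/eve-source | src/_decomp/chatutil/__init__.py | StripBreaks
-- ===== SOURCE A (Python) =====
-- def StripBreaks(txt):
--     txt = txt.strip()
--     while txt.endswith('<br>'):
--         txt = txt[:-4]
--         txt = txt.strip()
--
--     while txt.startswith('<br>'):
--         txt = txt[4:]
--         txt = txt.strip()
--
--     return txt
-- ===== SOURCE B (Python) =====
-- def StripBreaks(txt):
--     # Two-pointer version: never builds intermediate strings; one index walks in
--     # from each end over the original string, then a single final slice.
--     i, j = 0, len(txt)
--     while True:
--         while i < j and txt[j - 1].isspace():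
--             j -= 1
--         if 4 <= j - i and txt[j - 4:j] == '<br>':
--             j -= 4
--         else:
--             break
--     while True:
--         while i < j and txt[i].isspace():
--             i += 1
--         if 4 <= j - i and txt[i:i + 4] == '<br>':
--             i += 4
--         else:
--             break
--     return txt[i:j]
-- ===== Notes on version B (the rewrite author's own statement) =====
-- stated objective: alternative
-- what changed: Replaces A's repeated string re-building (strip() and slicing inside two while-loops) with a two-pointer scan: one index walks in from each end of the original string past whitespace and full '<br>' tokens, and a single final slice produces the result.
import Mathlib
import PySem

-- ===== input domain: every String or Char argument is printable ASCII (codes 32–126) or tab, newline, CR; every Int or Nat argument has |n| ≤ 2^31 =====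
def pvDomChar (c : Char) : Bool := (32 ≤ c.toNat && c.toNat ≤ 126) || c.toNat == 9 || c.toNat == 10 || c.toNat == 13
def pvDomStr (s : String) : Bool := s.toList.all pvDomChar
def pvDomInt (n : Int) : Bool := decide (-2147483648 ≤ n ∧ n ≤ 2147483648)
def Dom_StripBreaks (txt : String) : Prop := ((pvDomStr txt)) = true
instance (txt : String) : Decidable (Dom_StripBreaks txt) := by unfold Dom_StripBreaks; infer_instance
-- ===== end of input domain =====

-- B replaces A's repeated string re-building (strip()/slice inside two while loops) with a
-- two-pointer scan over the original string and one final slice; same return value everywhere.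

-- the '<br>' token
def StripBreaksTok : List Char := ['<', 'b', 'r', '>']

-- ===== PORT A =====
-- termination helper for port A: strip never lengthens a string
theorem pvStripLenLe (x : List Char) : (PySem.Chars.strip x).length ≤ x.length := by
  have h1 := List.length_dropWhile_le (p := PySem.Chars.isspace)
      (l := (List.dropWhile PySem.Chars.isspace x).reverse)
  have h2 := List.length_dropWhile_le (p := PySem.Chars.isspace) (l := x)
  simp only [PySem.Chars.strip, PySem.Chars.rstrip, PySem.Chars.lstrip, List.length_reverse] at *
  omega

-- A's first while loop: while txt.endswith('<br>'): txt = txt[:-4]; txt = txt.strip()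
def trimEndA (s : List Char) : List Char :=
  if PySem.Chars.endswith s StripBreaksTok = true then
    trimEndA (PySem.Chars.strip (PySem.List.slice s none (some (-4))))
  else s
termination_by s.length
decreasing_by
  rename_i h
  have hsfx : StripBreaksTok <:+ s := (PySem.Chars.endswith_iff _ _).mp h
  have h4 : 4 ≤ s.length := by simpa [StripBreaksTok] using hsfx.length_le
  have hsl : PySem.List.slice s none (some (-4)) = s.take (s.length - 4) :=
    PySem.List.slice_to_neg_ofNat s 4 (by omega)
  have := pvStripLenLe (PySem.List.slice s none (some (-4)))
  rw [hsl] at this ⊢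
  simp only [List.length_take] at this ⊢
  omega

-- A's second while loop: while txt.startswith('<br>'): txt = txt[4:]; txt = txt.strip()
def trimStartA (s : List Char) : List Char :=
  if PySem.Chars.startswith s StripBreaksTok = true then
    trimStartA (PySem.Chars.strip (PySem.List.slice s (some 4) none))
  else s
termination_by s.length
decreasing_by
  rename_i h
  have hpfx : StripBreaksTok <+: s := (PySem.Chars.startswith_iff _ _).mp h
  have h4 : 4 ≤ s.length := by simpa [StripBreaksTok] using hpfx.length_le
  have hsl : PySem.List.slice s (some 4) none = s.drop 4 := by
    rw [PySem.List.slice_from s (by omega : (0:Int) ≤ 4)]; rfl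
  have := pvStripLenLe (PySem.List.slice s (some 4) none)
  rw [hsl] at this ⊢
  simp only [List.length_drop] at this ⊢
  omega

def StripBreaks (txt : String) : String :=
  String.ofList (trimStartA (trimEndA (PySem.Chars.strip txt.toList)))

-- ===== PORT B =====
-- inner while of B's first loop: while i < j and txt[j-1].isspace(): j -= 1
def trimEndWsB (s : List Char) (i j : Nat) : Nat :=
  if i < j ∧ (PySem.List.pyGet? s ((j : Int) - 1)).any PySem.Chars.isspace = true then
    trimEndWsB s i (j - 1)
  else j
termination_by j
decreasing_by omega

theorem trimEndWsB_le (s : List Char) (i j : Nat) : trimEndWsB s i j ≤ j := by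
  induction j using Nat.strong_induction_on with
  | _ j ih =>
    rw [trimEndWsB]
    split
    · rename_i h
      exact le_trans (ih (j - 1) (by omega)) (by omega)
    · exact le_rfl

-- B's first loop: trim trailing whitespace, then a trailing '<br>', repeat
def trimEndB (s : List Char) (i j : Nat) : Nat :=
  let j' := trimEndWsB s i j
  if 4 ≤ j' - i ∧ PySem.List.slice s (some ((j' : Int) - 4)) (some (j' : Int)) = StripBreaksTok then
    trimEndB s i (j' - 4)
  else j'
termination_by j
decreasing_by
  rename_i h
  have := trimEndWsB_le s i j
  omega

-- inner while of B's second loop: while i < j and txt[i].isspace(): i += 1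
def trimStartWsB (s : List Char) (i j : Nat) : Nat :=
  if i < j ∧ (PySem.List.pyGet? s (i : Int)).any PySem.Chars.isspace = true then
    trimStartWsB s (i + 1) j
  else i
termination_by j - i
decreasing_by omega

theorem trimStartWsB_ge (s : List Char) (i j : Nat) : i ≤ trimStartWsB s i j := by
  induction hm : j - i using Nat.strong_induction_on generalizing i with
  | _ m ih =>
    rw [trimStartWsB]
    split
    · rename_i h
      exact le_trans (by omega) (ih (j - (i + 1)) (by omega) (i + 1) rfl)
    · exact le_rfl

-- B's second loop: skip leading whitespace, then a leading '<br>', repeat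
def trimStartB (s : List Char) (i j : Nat) : Nat :=
  let i' := trimStartWsB s i j
  if 4 ≤ j - i' ∧ PySem.List.slice s (some (i' : Int)) (some ((i' : Int) + 4)) = StripBreaksTok then
    trimStartB s (i' + 4) j
  else i'
termination_by j - i
decreasing_by
  rename_i h
  have := trimStartWsB_ge s i j
  omega

def StripBreaks_alt (txt : String) : String :=
  let s := txt.toList
  let j := trimEndB s 0 s.length
  let i := trimStartB s 0 j
  String.ofList (PySem.List.slice s (some (i : Int)) (some (j : Int)))

-- ===== PRECONDITION & SPEC =====
def Spec_StripBreaks (txt : String) (out : String) : Prop := out = StripBreaks_alt txt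
instance (txt : String) (out : String) : Decidable (Spec_StripBreaks txt out) := by unfold Spec_StripBreaks; infer_instance

-- ===== CLAIM (what is proved, stated in full; the proofs are below) =====
def Claim_equal_StripBreaks : Prop := ∀ (txt : String), Dom_StripBreaks txt → Spec_StripBreaks txt (StripBreaks txt)

-- ===== LEMMAS AND PROOFS =====

-- canonical one-sided trimmer: greedily remove whitespace chars and 4-char tokens t from the front
def ftrim (t : List Char) (s : List Char) : List Char :=
  match s with
  | [] => []
  | c :: r =>
    if PySem.Chars.isspace c then ftrim t r
    else if t.isPrefixOf (c :: r) then ftrim t ((c :: r).drop 4)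
    else c :: r
termination_by s.length
decreasing_by
  · simp
  · simp [List.length_drop]

-- ---- basic whitespace / dropWhile facts ----

theorem headNotWs_of_dropWhile_eq (p : Char → Bool) (c : Char) (r : List Char)
    (h : List.dropWhile p (c :: r) = c :: r) : p c = false := by
  rw [List.dropWhile_cons] at h
  split at h
  · have := List.length_dropWhile_le (p := p) (l := r)
    rw [h] at this
    simp at this
  · rename_i h2
    exact Bool.eq_false_iff.mpr h2

theorem dw_idem (p : Char → Bool) (l : List Char) :
    List.dropWhile p (List.dropWhile p l) = List.dropWhile p l := by
  induction l with
  | nil => rfl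
  | cons c r ih =>
    by_cases hc : p c = true
    · simp [List.dropWhile_cons, hc, ih]
    · simp [List.dropWhile_cons, hc]

theorem prefix_NL {y x : List Char} (p : Char → Bool) (hp : y <+: x)
    (hx : List.dropWhile p x = x) : List.dropWhile p y = y := by
  cases y with
  | nil => rfl
  | cons c ys =>
    obtain ⟨z, hz⟩ := hp
    have hc : p c = false := headNotWs_of_dropWhile_eq p c (ys ++ z) (by rw [← List.cons_append, hz]; exact hx)
    simp [List.dropWhile_cons, hc]

-- ---- ftrim basics ----

theorem ftrim_nil (t : List Char) : ftrim t [] = [] := by rw [ftrim]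

theorem ftrim_cons (t : List Char) (c : Char) (r : List Char) :
    ftrim t (c :: r) =
      if PySem.Chars.isspace c then ftrim t r
      else if t.isPrefixOf (c :: r) then ftrim t ((c :: r).drop 4)
      else c :: r := by
  rw [ftrim]

theorem ftrim_ws_all (t : List Char) (w : List Char) (h : ∀ c ∈ w, PySem.Chars.isspace c = true) :
    ftrim t w = [] := by
  induction w with
  | nil => exact ftrim_nil t
  | cons c r ih =>
    rw [ftrim_cons, if_pos (h c (by simp))]
    exact ih (fun c hc => h c (by simp [hc]))

theorem ftrim_dropWhile (t : List Char) (x : List Char) :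
    ftrim t (List.dropWhile PySem.Chars.isspace x) = ftrim t x := by
  induction x with
  | nil => rfl
  | cons c r ih =>
    by_cases hc : PySem.Chars.isspace c = true
    · rw [List.dropWhile_cons_of_pos hc, ih, ftrim_cons, if_pos hc]
    · rw [List.dropWhile_cons_of_neg hc]

theorem ftrim_ws_prefix (t : List Char) (w x : List Char)
    (h : ∀ c ∈ w, PySem.Chars.isspace c = true) :
    ftrim t (w ++ x) = ftrim t x := by
  induction w with
  | nil => rfl
  | cons c r ih =>
    rw [List.cons_append, ftrim_cons, if_pos (h c (by simp))]
    exact ih (fun c hc => h c (by simp [hc]))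

theorem ftrim_unfold2 (t : List Char) (x : List Char) (ht : t ≠ []) :
    ftrim t x =
      if t.isPrefixOf (List.dropWhile PySem.Chars.isspace x) then
        ftrim t ((List.dropWhile PySem.Chars.isspace x).drop 4)
      else List.dropWhile PySem.Chars.isspace x := by
  rw [← ftrim_dropWhile t x]
  cases hdw : List.dropWhile PySem.Chars.isspace x with
  | nil =>
    rw [ftrim_nil]
    cases t with
    | nil => exact absurd rfl ht
    | cons a b => simp [List.isPrefixOf]
  | cons c r =>
    have hc : PySem.Chars.isspace c = false := by
      apply headNotWs_of_dropWhile_eq PySem.Chars.isspace c r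
      rw [← hdw]; exact dw_idem _ x
    rw [ftrim_cons, if_neg (by simp [hc])]

theorem ftrim_suffix (t : List Char) (x : List Char) : ftrim t x <:+ x := by
  induction hn : x.length using Nat.strong_induction_on generalizing x with
  | _ n ih =>
    subst hn
    cases x with
    | nil => rw [ftrim_nil]
    | cons c r =>
      rw [ftrim_cons]
      split
      · exact (ih r.length (by simp only [List.length_cons]; omega) r rfl).trans (List.suffix_cons c r)
      · split
        · refine ((ih ((c :: r).drop 4).length ?_ _ rfl).trans (List.drop_suffix 4 (c :: r)))
          simp only [List.length_drop, List.length_cons]; omega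
        · exact List.suffix_refl _

theorem ftrim_noLeadWs (t : List Char) (x : List Char) :
    List.dropWhile PySem.Chars.isspace (ftrim t x) = ftrim t x := by
  induction hn : x.length using Nat.strong_induction_on generalizing x with
  | _ n ih =>
    subst hn
    cases x with
    | nil => rw [ftrim_nil]; rfl
    | cons c r =>
      rw [ftrim_cons]
      split
      · exact ih r.length (by simp only [List.length_cons]; omega) r rfl
      · split
        · exact ih ((c :: r).drop 4).length (by simp only [List.length_drop, List.length_cons]; omega) _ rfl
        · rename_i hc _
          simp [List.dropWhile_cons, hc]

-- ---- strip facts ----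

theorem strip_eq (x : List Char) :
    PySem.Chars.strip x =
      (List.dropWhile PySem.Chars.isspace ((List.dropWhile PySem.Chars.isspace x).reverse)).reverse := rfl

theorem rstrip_eq_self (y : List Char)
    (h : List.dropWhile PySem.Chars.isspace y.reverse = y.reverse) : PySem.Chars.rstrip y = y := by
  simp [PySem.Chars.rstrip, PySem.Chars.lstrip, h]

theorem strip_of_NL (x : List Char) (h : List.dropWhile PySem.Chars.isspace x = x) :
    PySem.Chars.strip x = PySem.Chars.rstrip x := by
  simp [PySem.Chars.strip, PySem.Chars.lstrip, h]

theorem strip_prefix (x : List Char) : PySem.Chars.strip x <+: List.dropWhile PySem.Chars.isspace x := by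
  rw [strip_eq]
  apply List.reverse_suffix.mp
  rw [List.reverse_reverse]
  exact List.dropWhile_suffix _

theorem strip_NL (x : List Char) :
    List.dropWhile PySem.Chars.isspace (PySem.Chars.strip x) = PySem.Chars.strip x :=
  prefix_NL _ (strip_prefix x) (dw_idem _ x)

theorem strip_NR (x : List Char) :
    List.dropWhile PySem.Chars.isspace (PySem.Chars.strip x).reverse = (PySem.Chars.strip x).reverse := by
  rw [strip_eq, List.reverse_reverse]
  exact dw_idem _ _

theorem suffix_NR (y x : List Char) (hs : y <:+ x)
    (hx : List.dropWhile PySem.Chars.isspace x.reverse = x.reverse) :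
    List.dropWhile PySem.Chars.isspace y.reverse = y.reverse :=
  prefix_NL _ (List.reverse_prefix.mpr hs) hx

-- ---- token facts ----

theorem tok_noWs : ∀ c ∈ StripBreaksTok, PySem.Chars.isspace c = false := by
  intro c hc; fin_cases hc <;> decide

theorem tokR_noWs : ∀ c ∈ StripBreaksTok.reverse, PySem.Chars.isspace c = false := by
  intro c hc; fin_cases hc <;> decide

theorem ftrim_tok_prefix (t x : List Char) (hlen : t.length = 4)
    (hws : ∀ c ∈ t, PySem.Chars.isspace c = false) :
    ftrim t (t ++ x) = ftrim t x := by
  cases t with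
  | nil => simp at hlen
  | cons a b =>
    rw [List.cons_append, ftrim_cons, if_neg (by simp [hws a (by simp)]),
        if_pos (List.isPrefixOf_iff_prefix.mpr (by rw [← List.cons_append]; exact List.prefix_append _ _))]
    rw [← List.cons_append]
    have : (4 : Nat) = (a :: b).length := by omega
    rw [this, List.drop_left]

-- ---- port A equals the canonical trimmer ----

theorem trimEndA_eq (s : List Char) :
    List.dropWhile PySem.Chars.isspace s = s →
    List.dropWhile PySem.Chars.isspace s.reverse = s.reverse →
    trimEndA s = (ftrim StripBreaksTok.reverse s.reverse).reverse := by
  induction hn : s.length using Nat.strong_induction_on generalizing s with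
  | _ n ih =>
    subst hn
    intro hNL hNR
    by_cases h : PySem.Chars.endswith s StripBreaksTok = true
    · have hsfx : StripBreaksTok <:+ s := (PySem.Chars.endswith_iff _ _).mp h
      obtain ⟨v, hv⟩ := hsfx
      have h4 : 4 ≤ s.length := by simpa [StripBreaksTok] using List.IsSuffix.length_le ⟨v, hv⟩
      have hvlen : v.length = s.length - 4 := by
        rw [← hv]; simp [StripBreaksTok]
      rw [trimEndA, if_pos h, PySem.List.slice_to_neg_ofNat s 4 (by omega)]
      have htake : s.take (s.length - 4) = v := by
        rw [← hvlen, ← hv, List.take_left]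
      rw [htake]
      have hNLv : List.dropWhile PySem.Chars.isspace v = v :=
        prefix_NL _ ⟨StripBreaksTok, hv⟩ hNL
      -- right-hand side: peel the trailing token
      have hsr : s.reverse = StripBreaksTok.reverse ++ v.reverse := by
        rw [← hv, List.reverse_append]
      rw [hsr, ftrim_tok_prefix _ _ (by decide) tokR_noWs]
      -- left-hand side: apply the induction hypothesis to strip v
      rw [ih (PySem.Chars.strip v).length
            (by have := pvStripLenLe v; omega) _ rfl (strip_NL v) (strip_NR v)]
      -- and identify the two arguments of ftrim
      have hsv : (PySem.Chars.strip v).reverse = List.dropWhile PySem.Chars.isspace v.reverse := by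
        rw [strip_of_NL v hNLv]
        simp [PySem.Chars.rstrip, PySem.Chars.lstrip]
      rw [hsv, ftrim_dropWhile]
    · rw [trimEndA, if_neg h]
      have hfix : ftrim StripBreaksTok.reverse s.reverse = s.reverse := by
        cases hsr : s.reverse with
        | nil => exact ftrim_nil _
        | cons c r =>
          have hc : PySem.Chars.isspace c = false :=
            headNotWs_of_dropWhile_eq _ c r (by rw [← hsr]; exact hNR)
          have hnp : StripBreaksTok.reverse.isPrefixOf (c :: r) = false := by
            by_contra hcon
            have hpre : StripBreaksTok.reverse <+: s.reverse := by
              rw [hsr]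
              exact List.isPrefixOf_iff_prefix.mp (by revert hcon; cases StripBreaksTok.reverse.isPrefixOf (c :: r) <;> simp)
            exact h ((PySem.Chars.endswith_iff _ _).mpr (List.reverse_prefix.mp hpre))
          rw [ftrim_cons, if_neg (by simp [hc]), if_neg (by simp [hnp])]
      rw [hfix, List.reverse_reverse]

theorem trimStartA_eq (s : List Char) :
    List.dropWhile PySem.Chars.isspace s = s →
    List.dropWhile PySem.Chars.isspace s.reverse = s.reverse →
    trimStartA s = ftrim StripBreaksTok s := by
  induction hn : s.length using Nat.strong_induction_on generalizing s with
  | _ n ih =>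
    subst hn
    intro hNL hNR
    by_cases h : PySem.Chars.startswith s StripBreaksTok = true
    · have hpfx : StripBreaksTok <+: s := (PySem.Chars.startswith_iff _ _).mp h
      obtain ⟨u, hu⟩ := hpfx
      have h4 : 4 ≤ s.length := by simpa [StripBreaksTok] using List.IsPrefix.length_le ⟨u, hu⟩
      have hsl : PySem.List.slice s (some 4) none = s.drop 4 := by
        rw [PySem.List.slice_from s (by omega : (0:Int) ≤ 4)]; rfl
      have hul : u.length + 4 = s.length := by
        rw [← hu]; simp [StripBreaksTok]
      rw [trimStartA, if_pos h, hsl]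
      have hdrop : s.drop 4 = u := by
        rw [← hu]
        have : (4 : Nat) = StripBreaksTok.length := by decide
        rw [this, List.drop_left]
      rw [hdrop]
      have hNRu : List.dropWhile PySem.Chars.isspace u.reverse = u.reverse :=
        suffix_NR u s ⟨StripBreaksTok, hu⟩ hNR
      -- right-hand side: peel the leading token
      rw [← hu, ftrim_tok_prefix _ _ (by decide) tok_noWs]
      -- left-hand side: induction hypothesis on strip u
      rw [ih (PySem.Chars.strip u).length
            (by have := pvStripLenLe u; omega) _ rfl (strip_NL u) (strip_NR u)]
      -- identify the two arguments
      have hNRdw : List.dropWhile PySem.Chars.isspace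
          (List.dropWhile PySem.Chars.isspace u).reverse
          = (List.dropWhile PySem.Chars.isspace u).reverse :=
        suffix_NR _ u (List.dropWhile_suffix _) hNRu
      have hsu : PySem.Chars.strip u = List.dropWhile PySem.Chars.isspace u := by
        have : PySem.Chars.strip u = PySem.Chars.rstrip (List.dropWhile PySem.Chars.isspace u) := rfl
        rw [this, rstrip_eq_self _ hNRdw]
      rw [hsu, ftrim_dropWhile]
    · rw [trimStartA, if_neg h]
      cases hs : s with
      | nil => rw [ftrim_nil]
      | cons c r =>
        have hc : PySem.Chars.isspace c = false :=
          headNotWs_of_dropWhile_eq _ c r (by rw [← hs]; exact hNL)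
        have hnp : StripBreaksTok.isPrefixOf (c :: r) = false := by
          by_contra hcon
          have hpre : StripBreaksTok <+: s := by
            rw [hs]
            exact List.isPrefixOf_iff_prefix.mp (by revert hcon; cases StripBreaksTok.isPrefixOf (c :: r) <;> simp)
          exact h ((PySem.Chars.startswith_iff _ _).mpr hpre)
        rw [ftrim_cons, if_neg (by simp [hc]), if_neg (by simp [hnp])]

theorem A_eq_canon (s0 : List Char) :
    trimStartA (trimEndA (PySem.Chars.strip s0)) =
      ftrim StripBreaksTok ((ftrim StripBreaksTok.reverse (PySem.Chars.strip s0).reverse).reverse) := by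
  rw [trimEndA_eq _ (strip_NL s0) (strip_NR s0)]
  set y := (ftrim StripBreaksTok.reverse (PySem.Chars.strip s0).reverse).reverse with hy
  have hNLy : List.dropWhile PySem.Chars.isspace y = y := by
    apply prefix_NL _ _ (strip_NL s0)
    apply List.reverse_suffix.mp
    rw [hy, List.reverse_reverse]
    exact ftrim_suffix _ _
  have hNRy : List.dropWhile PySem.Chars.isspace y.reverse = y.reverse := by
    rw [hy, List.reverse_reverse]
    exact ftrim_noLeadWs _ _
  exact trimStartA_eq y hNLy hNRy

-- ---- a trailing all-whitespace block commutes with ftrim ----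

theorem ftrim_append_ws (t : List Char) (hlen : t.length = 4)
    (htws : ∀ c ∈ t, PySem.Chars.isspace c = false) :
    ∀ (r wv : List Char), (∀ c ∈ wv, PySem.Chars.isspace c = true) →
    ftrim t (r ++ wv) = if ftrim t r = [] then [] else ftrim t r ++ wv := by
  intro r
  induction hn : r.length using Nat.strong_induction_on generalizing r with
  | _ n ih =>
    subst hn
    intro wv hw
    cases r with
    | nil =>
      rw [List.nil_append, ftrim_nil, if_pos rfl]
      exact ftrim_ws_all t wv hw
    | cons c r' =>
      by_cases hc : PySem.Chars.isspace c = true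
      · have hfr : ftrim t (c :: r') = ftrim t r' := by rw [ftrim_cons, if_pos hc]
        have hfl : ftrim t ((c :: r') ++ wv) = ftrim t (r' ++ wv) := by
          rw [List.cons_append, ftrim_cons, if_pos hc]
        rw [hfl, hfr]
        exact ih r'.length (by simp only [List.length_cons]; omega) r' rfl wv hw
      · by_cases hp : t.isPrefixOf (c :: r') = true
        · have hp' : t <+: c :: r' := List.isPrefixOf_iff_prefix.mp hp
          have h4 : 4 ≤ (c :: r').length := by
            have := hp'.length_le; omega
          have hpe : t.isPrefixOf ((c :: r') ++ wv) = true :=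
            List.isPrefixOf_iff_prefix.mpr (hp'.trans (List.prefix_append _ _))
          have hfr : ftrim t (c :: r') = ftrim t ((c :: r').drop 4) := by
            rw [ftrim_cons, if_neg (by simp [hc]), if_pos hp]
          have hfl : ftrim t ((c :: r') ++ wv) = ftrim t ((c :: r').drop 4 ++ wv) := by
            rw [List.cons_append, ftrim_cons, if_neg (by simp [hc]),
                if_pos (by rw [← List.cons_append]; exact hpe), ← List.cons_append,
                List.drop_append_of_le_length h4]
          rw [hfl, hfr]
          exact ih ((c :: r').drop 4).length
            (by simp only [List.length_drop, List.length_cons]; omega) _ rfl wv hw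
        · have hpe : t.isPrefixOf ((c :: r') ++ wv) = false := by
            by_contra hcon
            have hpre : t <+: (c :: r') ++ wv :=
              List.isPrefixOf_iff_prefix.mp (by revert hcon; cases t.isPrefixOf ((c :: r') ++ wv) <;> simp)
            by_cases hlong : 4 ≤ (c :: r').length
            · exact hp (List.isPrefixOf_iff_prefix.mpr
                (List.prefix_of_prefix_length_le hpre (List.prefix_append _ _) (by omega)))
            · obtain ⟨z, hz⟩ := hpre
              set m := (c :: r').length with hm
              have hlz := congrArg List.length hz
              simp only [List.length_append] at hlz
              have hwl : 1 ≤ wv.length := by omega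
              have hmt : m < t.length := by omega
              have e0 : (t ++ z)[m]? = ((c :: r') ++ wv)[m]? := by rw [hz]
              rw [List.getElem?_append_left hmt,
                  List.getElem?_append_right (by simp [hm] : (c :: r').length ≤ m)] at e0
              have e0' : t[m]? = wv[0]? := by
                rw [e0]; congr 1; omega
              rw [List.getElem?_eq_getElem hmt, List.getElem?_eq_getElem (by omega)] at e0'
              have heq : t[m]'hmt = wv[0]'(by omega) := Option.some.inj e0'
              have hws1 : PySem.Chars.isspace (t[m]'hmt) = false :=
                htws _ (List.getElem_mem hmt)
              have hws2 : PySem.Chars.isspace (wv[0]'(by omega)) = true :=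
                hw _ (List.getElem_mem _)
              rw [heq, hws2] at hws1
              exact absurd hws1 (by simp)
          have hfr : ftrim t (c :: r') = c :: r' := by
            rw [ftrim_cons, if_neg (by simp [hc]), if_neg (by simp [hp])]
          have hfl : ftrim t ((c :: r') ++ wv) = (c :: r') ++ wv := by
            rw [List.cons_append, ftrim_cons, if_neg (by simp [hc]),
                if_neg (by
                  simp only [List.isPrefixOf_iff_prefix]
                  intro hcon2
                  have h1 : t.isPrefixOf ((c :: r') ++ wv) = true :=
                    List.isPrefixOf_iff_prefix.mpr (by rw [List.cons_append]; exact hcon2)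
                  rw [hpe] at h1
                  exact Bool.false_ne_true h1)]
          rw [hfl, hfr, if_neg (by simp)]

-- ---- the canonical trimmer of the raw string equals that of the stripped string ----

theorem bridge (s0 : List Char) :
    ftrim StripBreaksTok ((ftrim StripBreaksTok.reverse (PySem.Chars.strip s0).reverse).reverse) =
      ftrim StripBreaksTok ((ftrim StripBreaksTok.reverse s0.reverse).reverse) := by
  have hstep1 : ftrim StripBreaksTok.reverse (PySem.Chars.strip s0).reverse =
      ftrim StripBreaksTok.reverse (List.dropWhile PySem.Chars.isspace s0).reverse := by
    rw [strip_eq, List.reverse_reverse, ftrim_dropWhile]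
  set u := List.dropWhile PySem.Chars.isspace s0 with hu
  set w := List.takeWhile PySem.Chars.isspace s0 with hwdef
  have hws0 : s0.reverse = u.reverse ++ w.reverse := by
    rw [hu, hwdef, ← List.reverse_append, List.takeWhile_append_dropWhile]
  have hwall : ∀ c ∈ w, PySem.Chars.isspace c = true := by
    intro c hc; exact List.mem_takeWhile_imp hc
  have hstep2 : ftrim StripBreaksTok.reverse s0.reverse =
      if ftrim StripBreaksTok.reverse u.reverse = [] then []
      else ftrim StripBreaksTok.reverse u.reverse ++ w.reverse := by
    rw [hws0]
    exact ftrim_append_ws _ (by decide) tokR_noWs u.reverse w.reverse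
      (by intro c hc; exact hwall c (List.mem_reverse.mp hc))
  rw [hstep1, hstep2]
  by_cases hE : ftrim StripBreaksTok.reverse u.reverse = []
  · rw [hE, if_pos rfl]
  · rw [if_neg hE, List.reverse_append, List.reverse_reverse]
    rw [ftrim_ws_prefix _ _ _ hwall]

-- ---- port B: the end-side loops compute the canonical trimmer on the reversed prefix ----

theorem take_eq_append (s : List Char) (j : Nat) (hj0 : 0 < j) (hj1 : j - 1 < s.length) :
    s.take j = s.take (j - 1) ++ [s[j - 1]'hj1] := by
  conv_lhs => rw [show j = (j - 1) + 1 from by omega]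
  rw [List.take_succ, List.getElem?_eq_getElem hj1]
  rfl

theorem take_trimEndWsB (s : List Char) : ∀ j ≤ s.length,
    (s.take (trimEndWsB s 0 j)).reverse = List.dropWhile PySem.Chars.isspace (s.take j).reverse := by
  intro j
  induction j using Nat.strong_induction_on with
  | _ j ih =>
    intro hj
    rw [trimEndWsB]
    split
    · rename_i h
      obtain ⟨hlt, hany⟩ := h
      have hj1 : j - 1 < s.length := by omega
      have hcast : (j : Int) - 1 = ((j - 1 : Nat) : Int) := by omega
      rw [hcast, PySem.List.pyGet?_natCast, List.getElem?_eq_getElem hj1] at hany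
      simp only [Option.any_some] at hany
      rw [take_eq_append s j hlt hj1, List.reverse_append, List.reverse_singleton,
          List.singleton_append, List.dropWhile_cons_of_pos hany]
      exact ih (j - 1) (by omega) (by omega)
    · rename_i h
      rcases Nat.eq_zero_or_pos j with hj0 | hj0
      · subst hj0; simp
      · have hj1 : j - 1 < s.length := by omega
        have hcast : (j : Int) - 1 = ((j - 1 : Nat) : Int) := by omega
        rw [hcast, PySem.List.pyGet?_natCast, List.getElem?_eq_getElem hj1] at h
        simp only [Option.any_some] at h
        have hws : PySem.Chars.isspace (s[j - 1]'hj1) = false := by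
          rcases Bool.eq_false_or_eq_true (PySem.Chars.isspace (s[j - 1]'hj1)) with h' | h'
          · exact absurd ⟨hj0, h'⟩ h
          · exact h'
        have htk := take_eq_append s j hj0 hj1
        conv_rhs => rw [htk]
        rw [List.reverse_append, List.reverse_singleton, List.singleton_append,
            List.dropWhile_cons_of_neg (by simp [hws]), ← List.singleton_append,
            ← List.reverse_singleton, ← List.reverse_append, ← htk]

theorem trimEndB_le (s : List Char) (i : Nat) : ∀ j, trimEndB s i j ≤ j := by
  intro j
  induction j using Nat.strong_induction_on with
  | _ j ih =>
    have hws := trimEndWsB_le s i j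
    have heq : trimEndB s i j =
        if 4 ≤ trimEndWsB s i j - i ∧
            PySem.List.slice s (some ((trimEndWsB s i j : Int) - 4)) (some ((trimEndWsB s i j : Int))) = StripBreaksTok then
          trimEndB s i (trimEndWsB s i j - 4)
        else trimEndWsB s i j := by
      rw [trimEndB]
    rw [heq]
    split
    · rename_i h
      exact le_trans (ih (trimEndWsB s i j - 4) (by omega)) (by omega)
    · exact hws

-- the end-of-string token test, as a suffix statement about the reversed prefix
theorem slice_end_iff (s : List Char) (j' : Nat) (h4 : 4 ≤ j') (hle : j' ≤ s.length) :
    (PySem.List.slice s (some ((j' : Int) - 4)) (some (j' : Int)) = StripBreaksTok) ↔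
      StripBreaksTok.reverse <+: (s.take j').reverse := by
  have hcast : (j' : Int) - 4 = ((j' - 4 : Nat) : Int) := by omega
  rw [hcast, PySem.List.slice_natCast]
  have hd4 : j' - (j' - 4) = 4 := by omega
  rw [hd4]
  have hblen : ((s.drop (j' - 4)).take 4).length = 4 := by
    simp only [List.length_take, List.length_drop]
    omega
  have hsplit : s.take j' = s.take (j' - 4) ++ (s.drop (j' - 4)).take 4 := by
    have h1 : j' = (j' - 4) + 4 := by omega
    conv_lhs => rw [h1, List.take_add]
  rw [List.reverse_prefix]
  constructor
  · intro h
    exact ⟨s.take (j' - 4), by rw [hsplit, h]⟩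
  · intro h
    have hb : (s.drop (j' - 4)).take 4 <:+ s.take j' := ⟨s.take (j' - 4), hsplit.symm⟩
    have h1 : StripBreaksTok.reverse <+: (s.take j').reverse := List.reverse_prefix.mpr h
    have h2 : ((s.drop (j' - 4)).take 4).reverse <+: (s.take j').reverse := List.reverse_prefix.mpr hb
    have h3 : StripBreaksTok.reverse <+: ((s.drop (j' - 4)).take 4).reverse :=
      List.prefix_of_prefix_length_le h1 h2 (by simp [StripBreaksTok, hblen])
    have h4' : StripBreaksTok.reverse = ((s.drop (j' - 4)).take 4).reverse :=
      h3.eq_of_length (by simp [StripBreaksTok, hblen])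
    have := congrArg List.reverse h4'
    simpa using this.symm

theorem take_trimEndB (s : List Char) : ∀ j ≤ s.length,
    (s.take (trimEndB s 0 j)).reverse = ftrim StripBreaksTok.reverse (s.take j).reverse := by
  intro j
  induction j using Nat.strong_induction_on with
  | _ j ih =>
    intro hj
    have hws := trimEndWsB_le s 0 j
    set j' := trimEndWsB s 0 j with hj'def
    have hX : (s.take j').reverse = List.dropWhile PySem.Chars.isspace (s.take j).reverse :=
      take_trimEndWsB s j hj
    have heq : trimEndB s 0 j =
        if 4 ≤ j' - 0 ∧
            PySem.List.slice s (some ((j' : Int) - 4)) (some ((j' : Int))) = StripBreaksTok then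
          trimEndB s 0 (j' - 4)
        else j' := by
      rw [trimEndB]
    rw [heq, ftrim_unfold2 _ _ (by decide), ← hX]
    split
    · rename_i h
      obtain ⟨h4, hsl⟩ := h
      have h4' : 4 ≤ j' := by omega
      have hpre : StripBreaksTok.reverse <+: (s.take j').reverse :=
        (slice_end_iff s j' h4' (by omega)).mp hsl
      rw [if_pos (List.isPrefixOf_iff_prefix.mpr hpre)]
      have hblen : ((s.drop (j' - 4)).take 4).length = 4 := by
        simp only [List.length_take, List.length_drop]
        omega
      have hdrop : ((s.take j').reverse).drop 4 = (s.take (j' - 4)).reverse := by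
        have h1 : j' = (j' - 4) + 4 := by omega
        conv_lhs => rw [h1, List.take_add, List.reverse_append]
        have hdl := List.drop_left (l₁ := ((s.drop (j' - 4)).take 4).reverse) (l₂ := (s.take (j' - 4)).reverse)
        rw [List.length_reverse, hblen] at hdl
        exact hdl
      rw [hdrop]
      exact ih (j' - 4) (by omega) (by omega)
    · rename_i h
      have hpre : StripBreaksTok.reverse.isPrefixOf ((s.take j').reverse) = false := by
        by_contra hcon
        have hpre' : StripBreaksTok.reverse <+: (s.take j').reverse :=
          List.isPrefixOf_iff_prefix.mp
            (by revert hcon; cases StripBreaksTok.reverse.isPrefixOf ((s.take j').reverse) <;> simp)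
        have hlen : 4 ≤ j' := by
          have := hpre'.length_le
          simp only [List.length_reverse, List.length_take, StripBreaksTok] at this
          simp only [List.length_cons, List.length_nil] at this
          omega
        exact h ⟨by omega, (slice_end_iff s j' hlen (by omega)).mpr hpre'⟩
      rw [if_neg (by simp [hpre])]

-- ---- port B: the start-side loops ----

theorem drop_trimStartWsB (s : List Char) : ∀ j ≤ s.length, ∀ i,
    (s.take j).drop (trimStartWsB s i j) = List.dropWhile PySem.Chars.isspace ((s.take j).drop i) := by
  intro j hj i
  induction hm : j - i using Nat.strong_induction_on generalizing i with
  | _ m ih =>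
    rw [trimStartWsB]
    split
    · rename_i h
      obtain ⟨hij, hany⟩ := h
      have hil : i < s.length := by omega
      rw [PySem.List.pyGet?_natCast, List.getElem?_eq_getElem hil] at hany
      simp only [Option.any_some] at hany
      have hit : i < (s.take j).length := by simp [List.length_take]; omega
      rw [List.drop_eq_getElem_cons hit, List.getElem_take,
          List.dropWhile_cons_of_pos (by simpa using hany)]
      exact ih (j - (i + 1)) (by omega) (i + 1) rfl
    · rename_i h
      rcases Nat.lt_or_ge i j with hij | hij
      · have hil : i < s.length := by omega
        have hws : PySem.Chars.isspace (s[i]'hil) = false := by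
          rcases Bool.eq_false_or_eq_true (PySem.Chars.isspace (s[i]'hil)) with h' | h'
          · exact absurd ⟨hij, by rw [PySem.List.pyGet?_natCast, List.getElem?_eq_getElem hil]; simpa using h'⟩ h
          · exact h'
        have hit : i < (s.take j).length := by simp [List.length_take]; omega
        conv_rhs => rw [List.drop_eq_getElem_cons hit, List.getElem_take]
        rw [List.dropWhile_cons_of_neg (by simp [hws]), ← List.getElem_take (h := hit),
            ← List.drop_eq_getElem_cons hit]
      · have hnil : (s.take j).drop i = [] := by
          apply List.drop_eq_nil_of_le
          simp [List.length_take]; omega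
        rw [hnil]
        rfl

theorem trimStartWsB_le (s : List Char) : ∀ i j, i ≤ j → trimStartWsB s i j ≤ j := by
  intro i j
  induction hm : j - i using Nat.strong_induction_on generalizing i with
  | _ m ih =>
    intro hij
    rw [trimStartWsB]
    split
    · rename_i h
      exact ih (j - (i + 1)) (by omega) (i + 1) rfl (by omega)
    · exact hij

-- the start-of-string token test, as a prefix statement
theorem slice_start_iff (s : List Char) (j' i' : Nat) (h4 : 4 ≤ j' - i') (hle : j' ≤ s.length) :
    (PySem.List.slice s (some (i' : Int)) (some ((i' : Int) + 4)) = StripBreaksTok) ↔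
      StripBreaksTok <+: (s.take j').drop i' := by
  have hcast : (i' : Int) + 4 = ((i' + 4 : Nat) : Int) := by omega
  rw [hcast, PySem.List.slice_natCast]
  have hd4 : i' + 4 - i' = 4 := by omega
  rw [hd4]
  have hX : (s.take j').drop i' = (s.drop i').take (j' - i') := List.drop_take
  rw [hX, List.prefix_iff_eq_take]
  have : ((s.drop i').take (j' - i')).take StripBreaksTok.length = (s.drop i').take 4 := by
    rw [List.take_take, show StripBreaksTok.length = 4 from rfl, Nat.min_eq_left h4]
  rw [this]
  exact ⟨fun h => h.symm, fun h => h.symm⟩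

theorem drop_trimStartB (s : List Char) : ∀ j ≤ s.length, ∀ i, i ≤ j →
    (s.take j).drop (trimStartB s i j) = ftrim StripBreaksTok ((s.take j).drop i) := by
  intro j hj i
  induction hm : j - i using Nat.strong_induction_on generalizing i with
  | _ m ih =>
    intro hij
    have hwge := trimStartWsB_ge s i j
    have hwle := trimStartWsB_le s i j hij
    set i' := trimStartWsB s i j with hi'def
    have hX : (s.take j).drop i' = List.dropWhile PySem.Chars.isspace ((s.take j).drop i) :=
      drop_trimStartWsB s j hj i
    have heq : trimStartB s i j =
        if 4 ≤ j - i' ∧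
            PySem.List.slice s (some (i' : Int)) (some ((i' : Int) + 4)) = StripBreaksTok then
          trimStartB s (i' + 4) j
        else i' := by
      rw [trimStartB]
    rw [heq, ftrim_unfold2 _ _ (by decide), ← hX]
    split
    · rename_i h
      obtain ⟨h4, hsl⟩ := h
      have hpre : StripBreaksTok <+: (s.take j).drop i' :=
        (slice_start_iff s j i' h4 hj).mp hsl
      rw [if_pos (List.isPrefixOf_iff_prefix.mpr hpre)]
      have hdd : ((s.take j).drop i').drop 4 = (s.take j).drop (i' + 4) := by
        rw [List.drop_drop]
      rw [hdd]
      exact ih (j - (i' + 4)) (by omega) (i' + 4) rfl (by omega)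
    · rename_i h
      have hpre : StripBreaksTok.isPrefixOf ((s.take j).drop i') = false := by
        by_contra hcon
        have hpre' : StripBreaksTok <+: (s.take j).drop i' :=
          List.isPrefixOf_iff_prefix.mp
            (by revert hcon; cases StripBreaksTok.isPrefixOf ((s.take j).drop i') <;> simp)
        have hlen : 4 ≤ j - i' := by
          have := hpre'.length_le
          simp only [List.length_drop, List.length_take, StripBreaksTok] at this
          simp only [List.length_cons, List.length_nil] at this
          omega
        exact h ⟨hlen, (slice_start_iff s j i' hlen hj).mpr hpre'⟩
      rw [if_neg (by simp [hpre])]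

-- ---- B equals the canonical trimmer of the raw string ----

theorem B_eq_canon (s : List Char) :
    PySem.List.slice s (some ((trimStartB s 0 (trimEndB s 0 s.length) : Nat) : Int))
        (some ((trimEndB s 0 s.length : Nat) : Int)) =
      ftrim StripBreaksTok ((ftrim StripBreaksTok.reverse s.reverse).reverse) := by
  set j := trimEndB s 0 s.length with hjdef
  have hj : j ≤ s.length := trimEndB_le s 0 s.length
  set i := trimStartB s 0 j with hidef
  rw [PySem.List.slice_natCast, ← List.drop_take]
  have h1 : (s.take j).drop i = ftrim StripBreaksTok ((s.take j).drop 0) :=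
    drop_trimStartB s j hj 0 (by omega)
  rw [h1, List.drop_zero]
  have h2 : (s.take j).reverse = ftrim StripBreaksTok.reverse s.reverse := by
    have := take_trimEndB s s.length le_rfl
    rwa [List.take_length] at this
  rw [← h2, List.reverse_reverse]

theorem StripBreaks_spec : Claim_equal_StripBreaks := by
  intro txt _
  unfold Spec_StripBreaks StripBreaks StripBreaks_alt
  rw [A_eq_canon, bridge, ← B_eq_canon]
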